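-- pv_equiv track=rewrite | github.com/Alejoaho17/Proy_Final_Ale_Gab_Die_Carl | App.py | calcular_maximo_minimo
-- ===== SOURCE A (Python) =====
-- def calcular_maximo_minimo(lista, posicion):
--         # Inicializamos los valores de máximo y mínimo
--         maximo = lista[0][posicion]
--         minimo = lista[0][posicion]
--
--         # Recorremos la lista para encontrar el máximo y mínimo
--         for item in lista:
--             valor = item[posicion]
--             if valor > maximo:
--                 maximo = valor
--             if valor < minimo:
--                 minimo = valor
--
--         return maximo, minimo
-- ===== SOURCE B (Python) =====
-- def calcular_maximo_minimo(lista, posicion):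
--     valores = [item[posicion] for item in lista]
--     return max(valores), min(valores)
-- ===== Notes on version B (the rewrite author's own statement) =====
-- stated objective: idiomatic
-- what changed: B first materializes the target column as a list comprehension and then takes max() and min() with the builtins, instead of A's single loop tracking both extremes by hand.
import Mathlib
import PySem

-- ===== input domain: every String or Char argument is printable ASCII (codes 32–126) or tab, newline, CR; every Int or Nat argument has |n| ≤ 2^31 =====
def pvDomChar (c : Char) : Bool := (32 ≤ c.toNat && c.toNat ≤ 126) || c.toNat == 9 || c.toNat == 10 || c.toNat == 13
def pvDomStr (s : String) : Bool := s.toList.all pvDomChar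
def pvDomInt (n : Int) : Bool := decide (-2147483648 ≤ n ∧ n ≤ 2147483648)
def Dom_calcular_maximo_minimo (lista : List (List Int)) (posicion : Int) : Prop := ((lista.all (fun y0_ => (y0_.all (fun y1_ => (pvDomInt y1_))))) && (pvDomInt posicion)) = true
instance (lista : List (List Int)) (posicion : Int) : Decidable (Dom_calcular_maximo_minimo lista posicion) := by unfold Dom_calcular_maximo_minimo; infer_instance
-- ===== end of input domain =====

-- B replaces A's hand-rolled single loop tracking both extremes by the idiomatic
-- build-the-column-then-max/min decomposition; equal on all inputs where A returns.

-- ===== PORT A =====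
-- A: seed max and min with lista[0][posicion], then one loop updating both.
def calcular_maximo_minimo (lista : List (List Int)) (posicion : Int) : Int × Int :=
  match PySem.List.pyGet? lista 0 with
  | none => (0, 0)    -- IndexError: excluded by Pre_
  | some fila0 =>
    match PySem.List.pyGet? fila0 posicion with
    | none => (0, 0)  -- IndexError: excluded by Pre_
    | some v0 =>
      lista.foldl (fun mm item =>
        match PySem.List.pyGet? item posicion with
        | none => mm  -- IndexError in Python: unreachable under Pre_
        | some valor =>
          ((if valor > mm.1 then valor else mm.1),
           (if valor < mm.2 then valor else mm.2))) (v0, v0)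

-- ===== PORT B =====
-- B: valores = [item[posicion] for item in lista]; return max(valores), min(valores)
def calcular_maximo_minimo_alt (lista : List (List Int)) (posicion : Int) : Int × Int :=
  let valores := lista.map (fun item => (PySem.List.pyGet? item posicion).getD 0)
  match PySem.List.max? valores (fun v => v), PySem.List.min? valores (fun v => v) with
  | some mx, some mn => (mx, mn)
  | _, _ => (0, 0)    -- ValueError on empty list: excluded by Pre_

-- ===== PRECONDITION & SPEC =====
-- Pre_ excludes exactly the inputs where A raises IndexError: the empty list and any
-- row in which posicion is out of range (B also raises on all of these).
def Pre_calcular_maximo_minimo (lista : List (List Int)) (posicion : Int) : Prop :=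
  lista ≠ [] ∧ ∀ item ∈ lista, PySem.Raise.InRange item.length posicion
instance (lista : List (List Int)) (posicion : Int) : Decidable (Pre_calcular_maximo_minimo lista posicion) := by unfold Pre_calcular_maximo_minimo; infer_instance

def pvWitness_calcular_maximo_minimo : List (List Int) × Int := ([[1, 5], [3, 2], [2, 9]], 1)

def Spec_calcular_maximo_minimo (lista : List (List Int)) (posicion : Int) (out : Int × Int) : Prop := out = calcular_maximo_minimo_alt lista posicion
instance (lista : List (List Int)) (posicion : Int) (out : Int × Int) : Decidable (Spec_calcular_maximo_minimo lista posicion out) := by unfold Spec_calcular_maximo_minimo; infer_instance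

-- ===== CLAIM (what is proved, stated in full; the proofs are below) =====
def Claim_equal_calcular_maximo_minimo : Prop := ∀ (lista : List (List Int)) (posicion : Int), Dom_calcular_maximo_minimo lista posicion → Pre_calcular_maximo_minimo lista posicion → Spec_calcular_maximo_minimo lista posicion (calcular_maximo_minimo lista posicion)

-- ===== LEMMAS AND PROOFS =====

-- A's loop body on an in-range row is the (max, min) pair step over the fetched value.
theorem pair_fold_max_min (vs : List Int) (a b : Int) :
    vs.foldl (fun (mm : Int × Int) v =>
      ((if v > mm.1 then v else mm.1), (if v < mm.2 then v else mm.2))) (a, b)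
    = (vs.foldl max a, vs.foldl min b) := by
  induction vs generalizing a b with
  | nil => rfl
  | cons v t ih =>
    simp only [List.foldl_cons, ih]
    congr 1 <;> [skip; skip] <;> congr 1 <;> omega

-- ===== VERDICT (by name: the statement is the Claim_ definition above) =====
theorem calcular_maximo_minimo_spec : Claim_equal_calcular_maximo_minimo := by
  intro lista posicion _hdom hpre
  obtain ⟨hne, hin⟩ := hpre
  unfold Spec_calcular_maximo_minimo
  obtain ⟨fila0, rest, rfl⟩ : ∃ f r, lista = f :: r := by
    cases lista with
    | nil => exact absurd rfl hne
    | cons f r => exact ⟨f, r, rfl⟩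
  -- the fetched column
  set f : List Int → Int := fun item => (PySem.List.pyGet? item posicion).getD 0 with hf
  have hget : ∀ item ∈ fila0 :: rest, PySem.List.pyGet? item posicion = some (f item) := by
    intro item hm
    have hr := hin item hm
    rcases h : PySem.List.pyGet? item posicion with _ | v
    · exact absurd ((PySem.List.pyGet?_eq_none_iff _ _).mp h) (not_not_intro hr)
    · simp [hf, h]
  have h0 : PySem.List.pyGet? fila0 posicion = some (f fila0) :=
    hget fila0 (List.mem_cons_self ..)
  -- Port A reduces to the pair fold over the mapped column
  have hA : calcular_maximo_minimo (fila0 :: rest) posicion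
      = ((rest.map f).foldl max (f fila0),
         (rest.map f).foldl min (f fila0)) := by
    unfold calcular_maximo_minimo
    rw [PySem.List.pyGet?_zero_cons]
    simp only [h0]
    have hmax : ((fila0 :: rest).map f).foldl max (f fila0) = (rest.map f).foldl max (f fila0) := by
      simp [List.foldl_cons]
    have hmin : ((fila0 :: rest).map f).foldl min (f fila0) = (rest.map f).foldl min (f fila0) := by
      simp [List.foldl_cons]
    rw [← hmax, ← hmin, ← pair_fold_max_min, List.foldl_map]
    apply PySem.List.foldl_congr_mem
    intro mm item hm
    rw [hget item hm]
  -- Port B is max?/min? of the same column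
  have hB : calcular_maximo_minimo_alt (fila0 :: rest) posicion
      = ((rest.map f).foldl max (f fila0),
         (rest.map f).foldl min (f fila0)) := by
    unfold calcular_maximo_minimo_alt
    simp only [List.map_cons]
    rw [PySem.List.max?_id_cons, PySem.List.min?_id_cons]
  rw [hA, hB]
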